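-- pv_equiv track=rewrite | github.com/segorucu/Leetcode | 2505 Bitwise OR of All Subsequence Sums/2505bitwise-or-of-all-subsequence-sums.py | subsequenceSumOr
-- ===== SOURCE A (Python) =====
-- from typing import List
--
-- def subsequenceSumOr(nums: List[int]) -> int:
--
--     counter = 64 * [0]
--     for num in nums:
--         for index in range(32):
--             mask = 1 << index
--             if num & mask == mask:
--                 counter[index] += 1
--
--     ans = 0
--     for i in range(63):
--         if counter[i] > 0:
--             ans |= (1 << i)
--         counter[i+1] += counter[i] // 2
--
--     return ans
-- ===== SOURCE B (Python) =====
-- def subsequenceSumOr(nums):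
--     # Per-bit threshold: answer bit i is set iff the sum of the elements'
--     # low i+1 bits (elements taken mod 2**32, as A does) reaches 2**i.
--     ms = [x & 0xFFFFFFFF for x in nums]
--     ans = 0
--     for i in range(63):
--         t = sum(m & ((2 << i) - 1) for m in ms)
--         if t >> i:
--             ans |= 1 << i
--     return ans
-- ===== Notes on version B (the rewrite author's own statement) =====
-- stated objective: alternative
-- what changed: Replaces A's 64-slot per-bit counter array plus carry-propagation loop by a direct per-bit threshold test: bit i of the answer is set iff the sum of the elements' values mod 2^(i+1) (elements masked to 32 bits) is at least 2^i; no counter array and no carry state is kept.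
import Mathlib
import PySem

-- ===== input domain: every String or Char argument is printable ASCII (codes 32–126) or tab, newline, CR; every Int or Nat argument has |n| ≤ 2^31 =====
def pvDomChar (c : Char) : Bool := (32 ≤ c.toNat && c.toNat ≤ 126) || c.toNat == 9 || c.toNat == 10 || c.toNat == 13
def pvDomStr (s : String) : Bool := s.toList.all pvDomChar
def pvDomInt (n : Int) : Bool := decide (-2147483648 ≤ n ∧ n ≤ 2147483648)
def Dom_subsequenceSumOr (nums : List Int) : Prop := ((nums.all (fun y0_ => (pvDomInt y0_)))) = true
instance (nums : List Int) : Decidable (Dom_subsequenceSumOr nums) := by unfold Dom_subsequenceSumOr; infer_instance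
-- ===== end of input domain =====

-- B replaces A's 64-slot bit-counter + carry-propagation loop by a per-bit threshold test
-- (bit i of the answer is set iff the sum of the elements mod 2^(i+1), elements masked to
-- 32 bits, reaches 2^i); same asymptotic cost, no speed claim.


-- ===== PORT A =====
-- body of A's inner 'for index in range(32)' loop (index comes from range(32), so it is
-- nonnegative and '.toNat' of it is exact for '1 << index'; counter[index] is always in
-- range, so pyGetD/pySetD are exact here)
def innerStep (num : Int) (counter : List Int) (index : Int) : List Int :=
  let mask : Int := 1 <<< index.toNat
  if PySem.Int.band num mask == mask then
    PySem.List.pySetD counter index (PySem.List.pyGetD counter index 0 + 1)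
  else counter

-- body of A's 'for i in range(63)' carry loop (i from range(63) is nonnegative; indices
-- i and i+1 are always in range of the 64-slot list)
def carryStep (st : Int × List Int) (i : Int) : Int × List Int :=
  let ans := if PySem.List.pyGetD st.2 i 0 > 0 then PySem.Int.bor st.1 (1 <<< i.toNat) else st.1
  let counter := PySem.List.pySetD st.2 (i + 1)
      (PySem.List.pyGetD st.2 (i + 1) 0 + PySem.Int.floordiv (PySem.List.pyGetD st.2 i 0) 2)
  (ans, counter)

def subsequenceSumOr (nums : List Int) : Int :=
  let counter : List Int := List.replicate 64 0
  let counter := nums.foldl (fun c num => (PySem.List.pyRange 0 32).foldl (innerStep num) c) counter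
  ((PySem.List.pyRange 0 63).foldl carryStep (0, counter)).1

-- ===== PORT B =====
-- body of B's 'for i in range(63)' loop (i from range(63) is nonnegative); 'sum(…)' is the
-- fold of + over the generator starting from 0
def altStep (ms : List Int) (ans : Int) (i : Int) : Int :=
  let t := ms.foldl (fun acc m => acc + PySem.Int.band m ((2 <<< i.toNat) - 1)) 0
  if t >>> i.toNat != 0 then PySem.Int.bor ans (1 <<< i.toNat) else ans

def subsequenceSumOr_alt (nums : List Int) : Int :=
  let ms := nums.map (fun x => PySem.Int.band x 4294967295)
  (PySem.List.pyRange 0 63).foldl (altStep ms) 0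

-- ===== PRECONDITION & SPEC =====
def Spec_subsequenceSumOr (nums : List Int) (out : Int) : Prop := out = subsequenceSumOr_alt nums
instance (nums : List Int) (out : Int) : Decidable (Spec_subsequenceSumOr nums out) := by unfold Spec_subsequenceSumOr; infer_instance

-- ===== CLAIM (what is proved, stated in full; the proofs are below) =====
def Claim_equal_subsequenceSumOr : Prop := ∀ (nums : List Int), Dom_subsequenceSumOr nums → Spec_subsequenceSumOr nums (subsequenceSumOr nums)

-- ===== LEMMAS AND PROOFS =====

def pvM (x : Int) : Nat := (PySem.Int.band x 4294967295).toNat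

theorem band_mask_eq (x : Int) : PySem.Int.band x 4294967295 = ((pvM x : Nat) : Int) := by
  have h : (0:Int) ≤ PySem.Int.band x 4294967295 := by
    rw [PySem.Int.band_comm]
    exact PySem.Int.band_nonneg_of_nonneg_left _ (by norm_num)
  simp [pvM, Int.toNat_of_nonneg h]

theorem toNat_mask : (4294967295:Int).toNat = 2 ^ 32 - 1 := rfl

theorem pvM_eq_of_nonneg (x : Int) (hx : 0 ≤ x) : pvM x = x.toNat % 2 ^ 32 := by
  unfold pvM
  rw [PySem.Int.band_of_nonneg hx (by norm_num), toNat_mask, Nat.and_two_pow_sub_one_eq_mod]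
  omega

theorem pvM_eq_of_neg (x : Int) (hx : ¬ (0:Int) ≤ x) :
    pvM x = 2 ^ 32 - (((-x).toNat - 1) % 2 ^ 32 + 1) := by
  unfold pvM
  simp only [PySem.Int.band, hx, if_false, if_pos (by norm_num : (0:Int) ≤ 4294967295),
    toNat_mask]
  rw [Nat.and_comm, Nat.and_two_pow_sub_one_eq_mod, Int.toNat_natCast]
  have h1 : ((-x).toNat - 1) % 2 ^ 32 < 2 ^ 32 := Nat.mod_lt _ (by norm_num)
  omega

theorem pvM_lt (x : Int) : pvM x < 2 ^ 32 := by
  by_cases hx : (0:Int) ≤ x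
  · rw [pvM_eq_of_nonneg x hx]; exact Nat.mod_lt _ (by norm_num)
  · rw [pvM_eq_of_neg x hx]
    have h1 : ((-x).toNat - 1) % 2 ^ 32 < 2 ^ 32 := Nat.mod_lt _ (by norm_num)
    omega

theorem cond_iff (num : Int) (j : Nat) (hj : j < 32) :
    (PySem.Int.band num (((2 ^ j : Nat) : Int)) == ((2 ^ j : Nat) : Int)) = Nat.testBit (pvM num) j := by
  by_cases hx : (0:Int) ≤ num
  · rw [PySem.Int.band_of_nonneg hx (by positivity), Int.toNat_natCast,
      pvM_eq_of_nonneg num hx, Nat.and_two_pow, Nat.testBit_mod_two_pow]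
    simp only [hj, decide_true, Bool.true_and]
    cases h : num.toNat.testBit j
    · simp
      intro hh
      have h2 : (0:Int) < 2 ^ j := by positivity
      omega
    · simp
  · rw [pvM_eq_of_neg num hx]
    simp only [PySem.Int.band, hx, if_false,
      if_pos (by positivity : (0:Int) ≤ ((2 ^ j : Nat) : Int)), Int.toNat_natCast]
    rw [Nat.testBit_two_pow_sub_succ (Nat.mod_lt _ (by norm_num)), Nat.testBit_mod_two_pow]
    simp only [hj, decide_true, Bool.true_and]
    rw [Nat.two_pow_and]
    cases h : (((-num).toNat - 1)).testBit j
    · simp [h]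
    · simp [h]
      intro hh
      have h2 : (0:Int) < 2 ^ j := by positivity
      omega
def pvC (nums : List Int) (j : Nat) : Nat := nums.countP (fun num => Nat.testBit (pvM num) j)
def pvT (nums : List Int) (i : Nat) : Nat := (nums.map (fun num => pvM num % 2 ^ (i + 1))).sum
def pvS (nums : List Int) : Nat → Nat
  | 0 => pvC nums 0
  | i + 1 => pvC nums (i + 1) + pvS nums i / 2


theorem bit_toNat (m k : Nat) : (if m.testBit k then 1 else 0) = m / 2 ^ k % 2 := by
  rw [Nat.testBit_eq_decide_div_mod_eq]
  rcases Nat.mod_two_eq_zero_or_one (m / 2 ^ k) with h | h <;> simp [h]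

theorem pvT_succ (nums : List Int) (i : Nat) :
    pvT nums (i + 1) = pvT nums i + pvC nums (i + 1) * 2 ^ (i + 1) := by
  induction nums with
  | nil => simp [pvT, pvC]
  | cons n ns ih =>
    simp only [pvT, pvC, List.map_cons, List.sum_cons, List.countP_cons] at *
    have hms : pvM n % 2 ^ (i + 1 + 1) = pvM n % 2 ^ (i + 1) + 2 ^ (i + 1) * (pvM n / 2 ^ (i + 1) % 2) :=
      Nat.mod_pow_succ
    rw [hms, ih, bit_toNat (pvM n) (i + 1)]
    ring

theorem pvT_zero (nums : List Int) : pvT nums 0 = pvC nums 0 := by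
  induction nums with
  | nil => simp [pvT, pvC]
  | cons n ns ih =>
    simp only [pvT, pvC, List.map_cons, List.sum_cons, List.countP_cons] at *
    rw [ih, bit_toNat (pvM n) 0]
    simp only [pow_zero, Nat.div_one]
    omega

theorem pvS_eq (nums : List Int) (i : Nat) : pvS nums i = pvT nums i / 2 ^ i := by
  induction i with
  | zero => simp [pvS, pvT_zero]
  | succ i ih =>
    show pvC nums (i + 1) + pvS nums i / 2 = _
    rw [ih, Nat.div_div_eq_div_mul, ← pow_succ, pvT_succ,
      Nat.add_mul_div_right _ _ (Nat.two_pow_pos (i + 1))]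
    omega

theorem t_eq (nums : List Int) (i : Nat) :
    ((nums.map (fun x => PySem.Int.band x 4294967295)).foldl
      (fun acc m => acc + PySem.Int.band m (((2 <<< i : Nat) : Int) - 1)) 0) = ((pvT nums i : Nat) : Int) := by
  have hmask : ((2 <<< i : Nat) : Int) - 1 = ((2 ^ (i + 1) - 1 : Nat) : Int) := by
    rw [Nat.shiftLeft_eq]
    push_cast [Nat.one_le_two_pow]
    rw [pow_succ]
    ring
  have key : ∀ (ns : List Int) (acc : Int),
      ((ns.map (fun x => PySem.Int.band x 4294967295)).foldl
        (fun acc m => acc + PySem.Int.band m (((2 <<< i : Nat) : Int) - 1)) acc) = acc + ((pvT ns i : Nat) : Int) := by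
    intro ns
    induction ns with
    | nil => intro acc; simp [pvT]
    | cons n ns ih =>
      intro acc
      simp only [List.map_cons, List.foldl_cons]
      rw [ih]
      have hn : PySem.Int.band (PySem.Int.band n 4294967295) ((2 <<< i) - 1)
          = ((pvM n % 2 ^ (i + 1) : Nat) : Int) := by
        rw [band_mask_eq, hmask, PySem.Int.band_natCast, Nat.and_two_pow_sub_one_eq_mod]
      rw [hn]
      simp only [pvT, List.map_cons, List.sum_cons]
      push_cast
      ring
  simpa using key nums 0


theorem innerStep_eq (num : Int) (l : List Int) (a : Nat) (ha : a < 32) :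
    innerStep num l (a : Int)
      = if Nat.testBit (pvM num) a
        then PySem.List.pySetD l (a : Int) (PySem.List.pyGetD l (a : Int) 0 + 1) else l := by
  unfold innerStep
  simp only [Int.toNat_natCast, Nat.shiftLeft_eq, one_mul]
  rw [cond_iff num a ha]

theorem inner_spec (num : Int) : ∀ (k a : Nat), a + k = 32 → ∀ l : List Int, l.length = 64 →
    ((PySem.List.pyRange (a : Int) 32).foldl (innerStep num) l).length = 64 ∧
    ∀ j : Nat, j < 64 →
      PySem.List.pyGetD ((PySem.List.pyRange (a : Int) 32).foldl (innerStep num) l) (j : Int) 0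
        = PySem.List.pyGetD l (j : Int) 0 +
          (if a ≤ j ∧ Nat.testBit (pvM num) j then 1 else 0) := by
  intro k
  induction k with
  | zero =>
    intro a ha l hl
    have ha' : a = 32 := by omega
    subst ha'
    rw [PySem.List.pyRange_one_eq_nil (by norm_num)]
    refine ⟨hl, fun j hj => ?_⟩
    have : ¬ (32 ≤ j ∧ Nat.testBit (pvM num) j) := by
      intro ⟨h1, h2⟩
      have hf := Nat.testBit_lt_two_pow (x := pvM num) (i := j)
        (lt_of_lt_of_le (pvM_lt num) (Nat.pow_le_pow_right (by norm_num) h1))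
      rw [hf] at h2; exact Bool.false_ne_true h2
    simp [List.foldl_nil, this]
  | succ k ih =>
    intro a ha l hl
    have halt : (a : Int) < 32 := by exact_mod_cast (by omega : a < 32)
    rw [PySem.List.pyRange_one_cons halt, List.foldl_cons]
    have hcast : ((a : Int) + 1) = ((a + 1 : Nat) : Int) := by push_cast; ring
    rw [hcast]
    have hl' : (innerStep num l (a : Int)).length = 64 := by
      rw [innerStep_eq num l a (by omega)]
      split
      · rw [PySem.List.length_pySetD]; exact hl
      · exact hl
    obtain ⟨hlen, hget⟩ := ih (a + 1) (by omega) (innerStep num l (a : Int)) hl'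
    refine ⟨hlen, fun j hj => ?_⟩
    rw [hget j hj, innerStep_eq num l a (by omega)]
    by_cases hb : Nat.testBit (pvM num) a
    · rw [if_pos hb, PySem.List.pyGetD_pySetD_natCast l a j _ 0 (by omega)]
      by_cases hja : j = a
      · subst hja
        simp [hb]
      · rw [if_neg hja]
        have : (a ≤ j ∧ Nat.testBit (pvM num) j) ↔ (a + 1 ≤ j ∧ Nat.testBit (pvM num) j) := by
          constructor
          · rintro ⟨h1, h2⟩; exact ⟨by omega, h2⟩
          · rintro ⟨h1, h2⟩; exact ⟨by omega, h2⟩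
        simp only [this]
    · rw [if_neg hb]
      by_cases hja : j = a
      · subst hja
        simp [hb]
      · have : (a ≤ j ∧ Nat.testBit (pvM num) j) ↔ (a + 1 ≤ j ∧ Nat.testBit (pvM num) j) := by
          constructor
          · rintro ⟨h1, h2⟩; exact ⟨by omega, h2⟩
          · rintro ⟨h1, h2⟩; exact ⟨by omega, h2⟩
        simp only [this]

theorem outer_spec : ∀ (ns : List Int) (l : List Int), l.length = 64 →
    (ns.foldl (fun c num => (PySem.List.pyRange 0 32).foldl (innerStep num) c) l).length = 64 ∧
    ∀ j : Nat, j < 64 →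
      PySem.List.pyGetD (ns.foldl (fun c num => (PySem.List.pyRange 0 32).foldl (innerStep num) c) l) (j : Int) 0
        = PySem.List.pyGetD l (j : Int) 0 + ((pvC ns j : Nat) : Int) := by
  intro ns
  induction ns with
  | nil => intro l hl; exact ⟨hl, fun j _ => by simp [pvC]⟩
  | cons n ns ih =>
    intro l hl
    simp only [List.foldl_cons]
    have h0 : ((0 : Nat) : Int) = (0 : Int) := rfl
    obtain ⟨hlen1, hget1⟩ := inner_spec n 32 0 (by omega) l hl
    rw [h0] at hlen1 hget1
    obtain ⟨hlen2, hget2⟩ := ih _ hlen1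
    refine ⟨hlen2, fun j hj => ?_⟩
    rw [hget2 j hj, hget1 j hj]
    have hc : pvC (n :: ns) j = (if Nat.testBit (pvM n) j then 1 else 0) + pvC ns j := by
      simp [pvC, List.countP_cons]
      omega
    rw [hc]
    simp only [Nat.zero_le, true_and]
    push_cast
    ring



theorem altStep_eq (nums : List Int) (ans : Int) (i : Nat) :
    altStep (nums.map (fun x => PySem.Int.band x 4294967295)) ans (i : Int)
      = if 0 < pvS nums i then PySem.Int.bor ans ((((1 <<< i : Nat)) : Int)) else ans := by
  unfold altStep
  simp only [Int.toNat_natCast]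
  rw [t_eq nums i]
  rw [Int.shiftRight_eq_div_pow]
  have hdiv : ((pvT nums i : Nat) : Int) / (((2 ^ i : Nat)) : Int) = ((pvT nums i / 2 ^ i : Nat) : Int) := by
    simp
  rw [hdiv, ← pvS_eq nums i]
  by_cases hp : 0 < pvS nums i
  · rw [if_pos hp, if_pos]
    simp only [bne_iff_ne, ne_eq]
    exact_mod_cast (by omega : ¬ ((pvS nums i : Int) = 0))
  · rw [if_neg hp, if_neg]
    simp only [bne_iff_ne, ne_eq, not_not]
    exact_mod_cast (by omega : ((pvS nums i : Int) = 0))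

theorem carry_join (nums : List Int) : ∀ (k i : Nat), i + k = 63 → ∀ (ans : Int) (l : List Int),
    l.length = 64 →
    PySem.List.pyGetD l (i : Int) 0 = ((pvS nums i : Nat) : Int) →
    (∀ j : Nat, i < j → j < 64 → PySem.List.pyGetD l (j : Int) 0 = ((pvC nums j : Nat) : Int)) →
    ((PySem.List.pyRange (i : Int) 63).foldl carryStep (ans, l)).1
      = (PySem.List.pyRange (i : Int) 63).foldl
          (altStep (nums.map (fun x => PySem.Int.band x 4294967295))) ans := by
  intro k
  induction k with
  | zero =>
    intro i hi ans l _ _ _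
    have : i = 63 := by omega
    subst this
    rw [PySem.List.pyRange_one_eq_nil (by norm_num)]
    simp
  | succ k ih =>
    intro i hi ans l hl hS hC
    have hilt : (i : Int) < 63 := by exact_mod_cast (by omega : i < 63)
    rw [PySem.List.pyRange_one_cons hilt, List.foldl_cons, List.foldl_cons]
    have hcast : ((i : Int) + 1) = ((i + 1 : Nat) : Int) := by push_cast; ring
    -- evaluate one step of A's carry loop
    have hstep : carryStep (ans, l) (i : Int)
        = (altStep (nums.map (fun x => PySem.Int.band x 4294967295)) ans (i : Int),
           PySem.List.pySetD l ((i + 1 : Nat) : Int)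
             (((pvS nums (i + 1) : Nat) : Int))) := by
      unfold carryStep
      rw [altStep_eq nums ans i]
      simp only [Int.toNat_natCast, hS, hcast]
      have hC1 : PySem.List.pyGetD l ((i + 1 : Nat) : Int) 0 = ((pvC nums (i + 1) : Nat) : Int) :=
        hC (i + 1) (by omega) (by omega)
      rw [hC1]
      have hfd : PySem.Int.floordiv ((pvS nums i : Nat) : Int) 2 = ((pvS nums i / 2 : Nat) : Int) := by
        show ((pvS nums i : Nat) : Int).fdiv ((2:Nat):Int) = _
        rw [Int.fdiv_eq_ediv]
        simp
      rw [hfd]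
      rw [Prod.mk.injEq]
      refine ⟨?_, ?_⟩
      · by_cases hp : 0 < pvS nums i
        · rw [if_pos hp, if_pos (by exact_mod_cast hp)]
        · rw [if_neg hp, if_neg (by exact_mod_cast hp)]
      · have : ((pvC nums (i + 1) : Nat) : Int) + ((pvS nums i / 2 : Nat) : Int)
            = ((pvS nums (i + 1) : Nat) : Int) := by
          show _ = ((pvC nums (i + 1) + pvS nums i / 2 : Nat) : Int)
          push_cast
          ring
        rw [this]
    rw [hstep, hcast]
    apply ih (i + 1) (by omega)
    · rw [PySem.List.length_pySetD]; exact hl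
    · rw [PySem.List.pyGetD_pySetD_natCast l (i + 1) (i + 1) _ 0 (by omega)]
      simp
    · intro j hj1 hj2
      rw [PySem.List.pyGetD_pySetD_natCast l (i + 1) j _ 0 (by omega)]
      rw [if_neg (by omega)]
      exact hC j (by omega) hj2

-- ===== VERDICT (by name: the statement is the Claim_ definition above) =====
theorem subsequenceSumOr_spec : Claim_equal_subsequenceSumOr := by
  intro nums _
  unfold Spec_subsequenceSumOr subsequenceSumOr subsequenceSumOr_alt
  obtain ⟨hlen, hget⟩ := outer_spec nums (List.replicate 64 0) (by simp)
  have hget' : ∀ j : Nat, j < 64 →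
      PySem.List.pyGetD
        (nums.foldl (fun c num => (PySem.List.pyRange 0 32).foldl (innerStep num) c)
          (List.replicate 64 0)) (j : Int) 0 = ((pvC nums j : Nat) : Int) := by
    intro j hj
    rw [hget j hj, PySem.List.pyGetD_natCast]
    rw [List.getD_eq_getElem?_getD, List.getElem?_replicate]
    split <;> simp
  have h0 : ((0 : Nat) : Int) = (0 : Int) := rfl
  have hmain := carry_join nums 63 0 (by norm_num) 0 _ hlen
    (by rw [h0]; exact hget' 0 (by norm_num))
    (fun j h1 h2 => hget' j h2)
  rw [h0] at hmain
  exact hmain
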